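-- pv_equiv track=rewrite | github.com/marin-community/marin | lib/levanter/tests/test_tokenizers.py | _longest_homogeneous_run
-- ===== SOURCE A (Python) =====
-- def _longest_homogeneous_run(s: str) -> int:
--     """Return the length of the longest run of consecutive whitespace OR
--     consecutive non-whitespace characters in ``s``."""
--     if not s:
--         return 0
--     longest = 1
--     current = 1
--     is_space = s[0].isspace()
--     for ch in s[1:]:
--         ch_is_space = ch.isspace()
--         if ch_is_space == is_space:
--             current += 1
--             if current > longest:
--                 longest = current
--         else:
--             current = 1
--             is_space = ch_is_space
--     return longest
-- ===== SOURCE B (Python) =====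
-- def _longest_homogeneous_run(s: str) -> int:
--     """Two-pointer scan: the outer loop visits each maximal homogeneous run
--     once, the inner pointer advances to the end of the run."""
--     n = len(s)
--     best = 0
--     i = 0
--     while i < n:
--         k = s[i].isspace()
--         j = i + 1
--         while j < n and s[j].isspace() == k:
--             j += 1
--         best = max(best, j - i)
--         i = j
--     return best
-- ===== Notes on version B (the rewrite author's own statement) =====
-- stated objective: alternative
-- what changed: Replaces A's per-character state machine (longest/current/is_space updated on every char) by a two-pointer scan whose outer loop visits each maximal homogeneous run once and takes the max of run lengths j-i.
import Mathlib
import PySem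

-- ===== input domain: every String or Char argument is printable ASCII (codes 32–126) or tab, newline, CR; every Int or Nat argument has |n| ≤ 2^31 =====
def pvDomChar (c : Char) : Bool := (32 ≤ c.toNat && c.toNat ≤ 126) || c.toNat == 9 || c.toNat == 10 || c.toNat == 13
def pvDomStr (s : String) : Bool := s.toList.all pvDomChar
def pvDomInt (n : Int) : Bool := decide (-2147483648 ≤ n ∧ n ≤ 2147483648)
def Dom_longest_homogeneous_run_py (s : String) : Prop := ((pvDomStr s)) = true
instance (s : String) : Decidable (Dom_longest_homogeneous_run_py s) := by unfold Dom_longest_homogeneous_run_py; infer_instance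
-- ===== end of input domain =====

-- B replaces A's per-character state machine (longest/current/is_space) by a two-pointer
-- scan that jumps run by run; same O(n) cost, alternative decomposition.

-- ===== PORT A =====
-- A's loop body, factored as a named helper; state = (longest, current, is_space)
def aStep (st : Int × Int × Bool) (ch : Char) : Int × Int × Bool :=
  let chIsSpace := PySem.Chars.isspace ch
  if chIsSpace == st.2.2 then
    let cur := st.2.1 + 1
    (if cur > st.1 then cur else st.1, cur, st.2.2)
  else
    (st.1, 1, chIsSpace)

def longest_homogeneous_run_py (s : String) : Int :=
  match s.toList with
  | [] => 0
  | c :: rest => (rest.foldl aStep (1, 1, PySem.Chars.isspace c)).1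

-- ===== PORT B =====
-- inner while loop of Source B: advance j to the end of the current run
def pvRunEnd (l : List Char) (k : Bool) (j : Nat) : Nat :=
  if h : j < l.length then
    if PySem.Chars.isspace l[j] == k then pvRunEnd l k (j + 1) else j
  else j
termination_by l.length - j

theorem le_pvRunEnd (l : List Char) (k : Bool) (j : Nat) : j ≤ pvRunEnd l k j := by
  fun_induction pvRunEnd l k j with
  | case1 j hj hk ih => omega
  | case2 j hj hk => omega
  | case3 j hj => omega

-- outer while loop of Source B
def pvOuter (l : List Char) (best : Int) (i : Nat) : Int :=
  if h : i < l.length then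
    let k := PySem.Chars.isspace l[i]
    let j := pvRunEnd l k (i + 1)
    pvOuter l (max best ((j : Int) - (i : Int))) j
  else best
termination_by l.length - i
decreasing_by
  have := le_pvRunEnd l (PySem.Chars.isspace l[i]) (i + 1)
  omega

def longest_homogeneous_run_py_alt (s : String) : Int :=
  pvOuter s.toList 0 0

-- ===== PRECONDITION & SPEC =====
def Spec_longest_homogeneous_run_py (s : String) (out : Int) : Prop := out = longest_homogeneous_run_py_alt s
instance (s : String) (out : Int) : Decidable (Spec_longest_homogeneous_run_py s out) := by unfold Spec_longest_homogeneous_run_py; infer_instance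

-- ===== CLAIM (what is proved, stated in full; the proofs are below) =====
def Claim_equal_longest_homogeneous_run_py : Prop := ∀ (s : String), Dom_longest_homogeneous_run_py s → Spec_longest_homogeneous_run_py s (longest_homogeneous_run_py s)

-- ===== LEMMAS AND PROOFS =====

-- reference value: the maximum run length, with a pending run of length `cur` and key `k`
def pend (k : Bool) (cur : Int) : List Char → Int
  | [] => cur
  | c :: rest =>
    if PySem.Chars.isspace c == k then pend k (cur + 1) rest
    else max cur (pend (PySem.Chars.isspace c) 1 rest)

def maxRuns : List Char → Int
  | [] => 0
  | c :: rest => pend (PySem.Chars.isspace c) 1 rest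

theorem pend_ge (l : List Char) (k : Bool) (cur : Int) : cur ≤ pend k cur l := by
  induction l generalizing k cur with
  | nil => simp [pend]
  | cons c rest ih =>
    simp only [pend]
    split
    · have := ih k (cur + 1); omega
    · exact le_max_left _ _

theorem maxRuns_nonneg (l : List Char) : 0 ≤ maxRuns l := by
  cases l with
  | nil => simp [maxRuns]
  | cons c rest => have := pend_ge rest (PySem.Chars.isspace c) 1; simp [maxRuns]; omega

theorem foldl_aStep_eq (rest : List Char) (longest cur : Int) (k : Bool)
    (h1 : 1 ≤ cur) (h2 : cur ≤ longest) :
    (rest.foldl aStep (longest, cur, k)).1 = max longest (pend k cur rest) := by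
  induction rest generalizing longest cur k with
  | nil => simp [pend]; omega
  | cons c t ih =>
    simp only [List.foldl_cons, aStep, pend]
    by_cases hsp : PySem.Chars.isspace c == k
    · simp only [hsp, if_true]
      rw [ih _ _ _ (by omega) (by split <;> omega)]
      have hp := pend_ge t k (cur + 1)
      rcases le_max_iff.mp (le_refl (max longest (pend k (cur+1) t))) with _ | _ <;>
        · split <;> omega
    · simp only [hsp, if_false, Bool.false_eq_true]
      rw [ih _ _ _ le_rfl (by omega)]
      omega

theorem a_eq_maxRuns (s : String) : longest_homogeneous_run_py s = maxRuns s.toList := by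
  cases hl : s.toList with
  | nil => unfold longest_homogeneous_run_py; rw [hl]; simp [maxRuns]
  | cons c rest =>
    unfold longest_homogeneous_run_py
    rw [hl]
    show (rest.foldl aStep (1, 1, PySem.Chars.isspace c)).1 = maxRuns (c :: rest)
    rw [foldl_aStep_eq rest 1 1 _ le_rfl le_rfl]
    have := pend_ge rest (PySem.Chars.isspace c) 1
    simp [maxRuns]; omega

theorem pend_drop (l : List Char) (k : Bool) (j : Nat) (cur : Int) (h1 : 1 ≤ cur) :
    pend k cur (l.drop j) =
      max (cur + ((pvRunEnd l k j : Int) - (j : Int))) (maxRuns (l.drop (pvRunEnd l k j))) := by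
  fun_induction pvRunEnd l k j generalizing cur with
  | case1 j hj hk ih =>
    rw [List.drop_eq_getElem_cons hj]
    simp only [pend]
    rw [if_pos hk, ih (cur + 1) (by omega)]
    have : cur + 1 + ((pvRunEnd l k (j+1) : Int) - ((j:Nat)+1 : Nat)) =
        cur + ((pvRunEnd l k (j+1) : Int) - (j : Int)) := by push_cast; ring
    rw [this]
  | case2 j hj hk =>
    rw [List.drop_eq_getElem_cons hj]
    simp only [pend, maxRuns]
    rw [if_neg hk]
    omega
  | case3 j hj =>
    have hd : l.drop j = [] := List.drop_eq_nil_of_le (by omega)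
    rw [hd]
    simp [pend, maxRuns]; omega

theorem pvOuter_eq (l : List Char) (i : Nat) (best : Int) (hb : 0 ≤ best) :
    pvOuter l best i = max best (maxRuns (l.drop i)) := by
  fun_induction pvOuter l best i with
  | case1 best i hi k j ih =>
    simp only [k, j] at ih ⊢
    rw [ih (by positivity)]
    have hm : maxRuns (l.drop i)
        = pend (PySem.Chars.isspace l[i]) 1 (l.drop (i+1)) := by
      rw [List.drop_eq_getElem_cons hi]; rfl
    rw [hm, pend_drop l _ (i+1) 1 le_rfl]
    push_cast
    omega
  | case2 best i hi =>
    have hd : l.drop i = [] := List.drop_eq_nil_of_le (by omega)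
    rw [hd]; simp [maxRuns]; omega

-- ===== VERDICT (by name: the statement is the Claim_ definition above) =====
theorem longest_homogeneous_run_py_spec : Claim_equal_longest_homogeneous_run_py := by
  intro s _
  unfold Spec_longest_homogeneous_run_py longest_homogeneous_run_py_alt
  rw [pvOuter_eq _ _ _ le_rfl, a_eq_maxRuns]
  have := maxRuns_nonneg s.toList
  simp; omega
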